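-- pv_equiv track=rewrite | github.com/ldascenzo/pytheas | CL_version/in_silico_digestion/2_modify.py | mod_nts_exceptions
-- ===== SOURCE A (Python) =====
-- import itertools
--
-- def mod_nts_exceptions(input_lines, mod_partial, mod_alphabet):
--     """
--     Append additional lines for multiple modification states (e.g mmA can be A, mA or mmA)
--     """
--     mod_lines, positions = [], []
--
--     for i, line in enumerate(input_lines):
--         # If only one residue is modified the combinations are only the number of possible modified states
--         # of the residue
--         if line.count("@") == 1:
--
--             for nt in mod_partial.keys():
--                 if nt in line.split()[1]:
--                     for x in mod_partial[nt]:
--                         s, t = line.split()[1].replace(nt, x), line.split()[-1].replace(mod_alphabet[nt],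
--                                                                                         mod_alphabet[x])
--                         mod_lines.append('{} {} {} {}'.format(line.split()[0], s, " ".join(line.split()[2:7]), t))
--                         positions.append(i + 1)
--
--         # If more than one residue has modifications the combination of possible fragment is more complex
--         # and requires further operations
--         elif line.count('@') > 1:
--             modifs, pos = [], []
--
--             # Identify the positions with partial modifications to be added
--             for a in mod_partial:
--                 if a in line.split()[1]:
--                     for n, ch in enumerate(line.split()[1]):
--                         if ch == a:
--                             modifs.append(a), pos.append(n)
--
--             new_modifs = []
--
--             # Create the list of the modifications for the cartesian product
--             for mod in modifs:
--                 new_modifs.append(mod + "".join(mod_partial[mod]))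
--
--             # Cartesian product to compute all possible modification combinations
--             permut_mod = itertools.product(*new_modifs)
--
--             # Add the info on modifications with extended ID for human readability
--             for x in permut_mod:
--
--                 string = list(line.split()[1])
--
--                 for n, t in enumerate(x):
--                     string[pos[n]] = t
--                 string2, string1 = string, "".join(string)
--
--                 for y, s in enumerate(string):
--                     if s in mod_alphabet:
--                         string2[y] = mod_alphabet[s]
--
--                 mod_lines.append(
--                     line.split()[0] + " " + string1 + " " + " ".join(line.split()[2:7]) + " " + "".join(string2) + "@" *
--                     line.split()[-1].count('@')), positions.append(i + 1)
--
--     assert (len(mod_lines) == len(positions))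
--     acc = 0
--
--     # Add lines with extended modification possibilities to the list
--     for i in range(len(mod_lines)):
--         input_lines.insert(positions[i] + acc, mod_lines[i])
--         acc += 1
--
--     return input_lines
-- ===== SOURCE B (Python) =====
-- def mod_nts_exceptions(input_lines, mod_partial, mod_alphabet):
--     """
--     Append additional lines for multiple modification states (e.g mmA can be A, mA or mmA)
--     """
--     def variants(line):
--         toks = line.split()
--         mid = " ".join(toks[2:7])
--
--         if line.count("@") == 1:
--             # one modified residue: one variant per alternative state
--             return ["{} {} {} {}".format(toks[0], toks[1].replace(nt, x), mid,
--                                          toks[-1].replace(mod_alphabet[nt], mod_alphabet[x]))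
--                     for nt in mod_partial if nt in toks[1]
--                     for x in mod_partial[nt]]
--
--         # several modified residues: expand every modifiable position recursively
--         seq = toks[1]
--         tail = "@" * toks[-1].count("@")
--         slots = [(n, nt + "".join(subs))
--                  for nt, subs in mod_partial.items() if nt in seq
--                  for n, ch in enumerate(seq) if ch == nt]
--
--         def expand(chars, rest):
--             if not rest:
--                 ext = "".join(mod_alphabet.get(c, c) for c in chars)
--                 return [toks[0] + " " + "".join(chars) + " " + mid + " " + ext + tail]
--             (n, alts) = rest[0]
--             out = []
--             for t in alts:
--                 new = list(chars)
--                 new[n] = t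
--                 out.extend(expand(new, rest[1:]))
--             return out
--
--         return expand(list(seq), slots)
--
--     result = []
--     for line in input_lines:
--         result.append(line)
--         if line.count("@") >= 1:
--             result.extend(variants(line))
--     input_lines[:] = result
--     return input_lines
-- ===== Notes on version B (the rewrite author's own statement) =====
-- stated objective: simpler
-- what changed: B drops A's global mod_lines/positions accumulators and the final index+offset insert loop, emitting each line followed by its variants in one pass, and replaces the itertools.product plus positions-array substitution of the multi-modification branch by a direct recursive expansion over (position, alternatives) slots.
import Mathlib
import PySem

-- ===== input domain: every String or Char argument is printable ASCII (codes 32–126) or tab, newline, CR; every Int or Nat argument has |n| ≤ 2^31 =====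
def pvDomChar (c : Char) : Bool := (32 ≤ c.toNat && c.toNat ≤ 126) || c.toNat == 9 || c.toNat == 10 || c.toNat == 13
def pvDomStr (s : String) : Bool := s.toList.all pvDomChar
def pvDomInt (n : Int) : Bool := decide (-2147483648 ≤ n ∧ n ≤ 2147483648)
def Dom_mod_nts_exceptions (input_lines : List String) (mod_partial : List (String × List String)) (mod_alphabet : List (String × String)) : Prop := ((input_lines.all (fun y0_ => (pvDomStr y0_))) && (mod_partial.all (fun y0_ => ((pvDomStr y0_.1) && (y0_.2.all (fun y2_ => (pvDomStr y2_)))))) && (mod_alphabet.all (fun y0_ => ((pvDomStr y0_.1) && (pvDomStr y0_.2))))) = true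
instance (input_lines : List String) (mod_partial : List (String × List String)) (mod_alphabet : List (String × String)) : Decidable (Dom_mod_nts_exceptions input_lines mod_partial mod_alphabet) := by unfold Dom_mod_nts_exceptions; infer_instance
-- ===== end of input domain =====

-- B replaces A's global mod_lines/positions bookkeeping and final insert loop by a single pass that
-- emits each line followed by its variants (objective: simpler).  A mutates input_lines in place; the
-- equivalence proved here is about the return value (B performs the same mutation via input_lines[:] = …).

-- ===== PORT A =====

-- itertools.product(*factors), ported by hand (exact: CPython varies the rightmost factor fastest)
def pyProduct {α : Type} : List (List α) → List (List α)
  | [] => [[]]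
  | f :: rest => f.flatMap (fun t => (pyProduct rest).map (fun tl => t :: tl))

def mod_nts_exceptions (input_lines : List String) (mod_partial : List (String × List String)) (mod_alphabet : List (String × String)) : List String :=
  let mp := PySem.Dict.ofList mod_partial
  let al := PySem.Dict.ofList mod_alphabet
  let st := (PySem.List.enumerate input_lines).foldl (fun (st : List String × List Int) il =>
    let i := il.1
    let line := il.2
    let toks := PySem.Str.split₀ line
    if PySem.Str.count line "@" = 1 then
      mp.keys.foldl (fun st1 nt =>
        if PySem.Str.isIn nt (PySem.List.pyGetD toks 1 "") then
          (mp.getD nt []).foldl (fun st2 x =>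
            let s := PySem.Str.replace (PySem.List.pyGetD toks 1 "") nt x
            let t := PySem.Str.replace (PySem.List.pyGetD toks (-1) "") (al.getD nt "") (al.getD x "")
            (st2.1 ++ [PySem.List.pyGetD toks 0 "" ++ " " ++ s ++ " " ++
                       PySem.Str.join " " (PySem.List.slice toks (some 2) (some 7)) ++ " " ++ t],
             st2.2 ++ [i + 1])) st1
        else st1) st
    else if 1 < PySem.Str.count line "@" then
      let mopos := mp.keys.foldl (fun (mo : List String × List Int) a =>
        if PySem.Str.isIn a (PySem.List.pyGetD toks 1 "") then
          (PySem.List.enumerate (PySem.List.pyGetD toks 1 "").toList).foldl (fun mo2 nc =>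
            if String.ofList [nc.2] = a then (mo2.1 ++ [a], mo2.2 ++ [nc.1]) else mo2) mo
        else mo) ([], [])
      let pos := mopos.2
      let new_modifs := mopos.1.foldl (fun acc m =>
        acc ++ [(m ++ PySem.Str.join "" (mp.getD m [])).toList]) []
      (pyProduct new_modifs).foldl (fun st1 x =>
        -- string[pos[n]] = t : pos[n] is a nonnegative in-range index, so .toNat and List.set are exact
        let string := (PySem.List.enumerate x).foldl
          (fun s nt => s.set (PySem.List.pyGetD pos nt.1 0).toNat nt.2) (PySem.List.pyGetD toks 1 "").toList
        let string1 := String.ofList string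
        let string2 := (PySem.List.enumerate string).foldl (fun (s2 : List String) ys =>
            if al.contains (String.ofList [ys.2]) then s2.set ys.1.toNat (al.getD (String.ofList [ys.2]) "") else s2)
          (string.map (fun c => String.ofList [c]))
        (st1.1 ++ [PySem.List.pyGetD toks 0 "" ++ " " ++ string1 ++ " " ++
                   PySem.Str.join " " (PySem.List.slice toks (some 2) (some 7)) ++ " " ++
                   PySem.Str.join "" string2 ++
                   String.ofList (List.replicate (PySem.Str.count (PySem.List.pyGetD toks (-1) "") "@") '@')],
         st1.2 ++ [i + 1])) st
    else st) ([], [])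
  -- final loop: list.insert at a nonnegative index ≤ len (always the case here) is List.insertIdx
  ((st.1.zip st.2).foldl (fun (la : List String × Int) mpp =>
      (la.1.insertIdx (mpp.2 + la.2).toNat mpp.1, la.2 + 1)) (input_lines, 0)).1

-- ===== PORT B =====

def pvExpand (al : PySem.Dict String String) (tok0 mid tail : String) :
    List (Int × List Char) → List Char → List String
  | [], chars =>
      [tok0 ++ " " ++ String.ofList chars ++ " " ++ mid ++ " " ++
       PySem.Str.join "" (chars.map (fun c => al.getD (String.ofList [c]) (String.ofList [c]))) ++ tail]
  | slot :: rest, chars =>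
      -- new = list(chars); new[slot.1] = t : the index is a nonnegative in-range enumerate index
      slot.2.foldl (fun out t => out ++ pvExpand al tok0 mid tail rest (chars.set slot.1.toNat t)) []

def pvVariants (mp : PySem.Dict String (List String)) (al : PySem.Dict String String) (line : String) : List String :=
  let toks := PySem.Str.split₀ line
  let mid := PySem.Str.join " " (PySem.List.slice toks (some 2) (some 7))
  if PySem.Str.count line "@" = 1 then
    mp.keys.flatMap (fun nt =>
      if PySem.Str.isIn nt (PySem.List.pyGetD toks 1 "") then
        (mp.getD nt []).map (fun x =>
          PySem.List.pyGetD toks 0 "" ++ " " ++ PySem.Str.replace (PySem.List.pyGetD toks 1 "") nt x ++ " " ++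
          mid ++ " " ++
          PySem.Str.replace (PySem.List.pyGetD toks (-1) "") (al.getD nt "") (al.getD x ""))
      else [])
  else
    let seq := PySem.List.pyGetD toks 1 ""
    let tail := String.ofList (List.replicate (PySem.Str.count (PySem.List.pyGetD toks (-1) "") "@") '@')
    let slots := mp.items.flatMap (fun p =>
      if PySem.Str.isIn p.1 seq then
        (PySem.List.enumerate seq.toList).filterMap (fun nc =>
          if String.ofList [nc.2] = p.1 then some (nc.1, (p.1 ++ PySem.Str.join "" p.2).toList) else none)
      else [])
    pvExpand al (PySem.List.pyGetD toks 0 "") mid tail slots seq.toList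

def mod_nts_exceptions_alt (input_lines : List String) (mod_partial : List (String × List String)) (mod_alphabet : List (String × String)) : List String :=
  let mp := PySem.Dict.ofList mod_partial
  let al := PySem.Dict.ofList mod_alphabet
  input_lines.foldl (fun result line =>
    let result := result ++ [line]
    if 1 ≤ PySem.Str.count line "@" then result ++ pvVariants mp al line else result) []

-- ===== PRECONDITION & SPEC =====
-- Pre_ excludes exactly the inputs where the Python A raises: an IndexError when a line containing '@'
-- has fewer than two whitespace tokens (for a single-'@' line only reached when mod_partial is nonempty),
-- and a KeyError when a single-'@' line matches a mod_partial key whose name or alternative states are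
-- missing from mod_alphabet.
def Pre_mod_nts_exceptions (input_lines : List String) (mod_partial : List (String × List String)) (mod_alphabet : List (String × String)) : Prop :=
  ∀ line ∈ input_lines,
    (PySem.Str.count line "@" = 1 →
       (mod_partial ≠ [] → 2 ≤ (PySem.Str.split₀ line).length) ∧
       (∀ nt ∈ (PySem.Dict.ofList mod_partial).keys,
          PySem.Str.isIn nt (PySem.List.pyGetD (PySem.Str.split₀ line) 1 "") = true →
          (PySem.Dict.ofList mod_partial).getD nt [] ≠ [] →
          (PySem.Dict.ofList mod_alphabet).contains nt = true ∧
          ∀ x ∈ (PySem.Dict.ofList mod_partial).getD nt [],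
            (PySem.Dict.ofList mod_alphabet).contains x = true)) ∧
    (1 < PySem.Str.count line "@" → 2 ≤ (PySem.Str.split₀ line).length)
instance (input_lines : List String) (mod_partial : List (String × List String)) (mod_alphabet : List (String × String)) : Decidable (Pre_mod_nts_exceptions input_lines mod_partial mod_alphabet) := by unfold Pre_mod_nts_exceptions; infer_instance

def pvWitness_mod_nts_exceptions : List String × (List (String × List String)) × (List (String × String)) :=
  (["a b@"], [("b", ["c"])], [("b", "b"), ("c", "c")])

def Spec_mod_nts_exceptions (input_lines : List String) (mod_partial : List (String × List String)) (mod_alphabet : List (String × String)) (out : List String) : Prop := out = mod_nts_exceptions_alt input_lines mod_partial mod_alphabet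
instance (input_lines : List String) (mod_partial : List (String × List String)) (mod_alphabet : List (String × String)) (out : List String) : Decidable (Spec_mod_nts_exceptions input_lines mod_partial mod_alphabet out) := by unfold Spec_mod_nts_exceptions; infer_instance

-- ===== CLAIM (what is proved, stated in full; the proofs are below) =====
def Claim_equal_mod_nts_exceptions : Prop := ∀ (input_lines : List String) (mod_partial : List (String × List String)) (mod_alphabet : List (String × String)), Dom_mod_nts_exceptions input_lines mod_partial mod_alphabet → Pre_mod_nts_exceptions input_lines mod_partial mod_alphabet → Spec_mod_nts_exceptions input_lines mod_partial mod_alphabet (mod_nts_exceptions input_lines mod_partial mod_alphabet)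

-- ===== LEMMAS AND PROOFS =====

-- per-line variant list (B's generation, guarded as in B's main loop)
def pvV (mp : PySem.Dict String (List String)) (al : PySem.Dict String String) (line : String) : List String :=
  if 1 ≤ PySem.Str.count line "@" then pvVariants mp al line else []

def pvPsFrom (g : String → List String) : List String → Int → List Int
  | [], _ => []
  | l :: t, s => List.replicate (g l).length (s + 1) ++ pvPsFrom g t (s + 1)

def pvPairsFrom (g : String → List String) : List String → Int → List (String × Int)
  | [], _ => []
  | l :: t, s => (g l).map (fun m => (m, s + 1)) ++ pvPairsFrom g t (s + 1)

theorem pv_set_len_append {α : Type} (done : List α) (x v : α) (rest : List α) :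
    (done ++ x :: rest).set done.length v = done ++ v :: rest := by
  induction done with
  | nil => rfl
  | cons a d ih => simp only [List.cons_append, List.length_cons, List.set_cons_succ, ih]

theorem pv_insertIdx_append {α : Type} (Q t : List α) (m : α) :
    (Q ++ t).insertIdx Q.length m = Q ++ m :: t := by
  induction Q with
  | nil => rfl
  | cons a Q ih => simp only [List.cons_append, List.length_cons, List.insertIdx_succ_cons, ih]

theorem pv_zip_replicate {α β : Type} (l : List α) (a : β) :
    l.zip (List.replicate l.length a) = l.map (fun x => (x, a)) := by
  induction l with
  | nil => rfl
  | cons x l ih => simp only [List.length_cons, List.replicate_succ, List.zip_cons_cons, ih, List.map_cons]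

theorem pv_filterMap_eq {α β : Type} (l : List α) (p : α → Prop) [DecidablePred p] (f : α → β) :
    l.filterMap (fun x => if p x then some (f x) else none)
      = (l.filter (fun x => decide (p x))).map f := by
  induction l with
  | nil => rfl
  | cons a l ih => by_cases h : p a <;> simp [h, ih]

theorem pv_getD_default {ν : Type} (al : PySem.Dict String ν) (k : String)
    (h : al.contains k = true) (d d' : ν) : al.getD k d = al.getD k d' := by
  rw [PySem.Dict.contains_eq_isSome_get?] at h
  obtain ⟨v, hv⟩ := Option.isSome_iff_exists.mp h
  rw [PySem.Dict.getD_of_get?_eq_some _ _ hv, PySem.Dict.getD_of_get?_eq_some _ _ hv]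

-- state pair fold appending one value and one position per element
theorem pv_fold_append_pair {α β : Type} (xs : List α) (st : List β × List Int) (F : α → β) (p : Int) :
    xs.foldl (fun st2 x => (st2.1 ++ [F x], st2.2 ++ [p])) st
      = (st.1 ++ xs.map F, st.2 ++ List.replicate xs.length p) := by
  obtain ⟨a, b⟩ := st
  rw [PySem.List.foldl_prod_mk (f := fun l x => l ++ [F x]) (g := fun l _ => l ++ [p])]
  rw [PySem.List.foldl_append_singleton_eq_map, PySem.List.foldl_append_singleton_eq_map]
  simp [List.map_const']

-- A's single-'@' branch: the nested append loop is a flatMap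
theorem pv_single_fold (c : String → Bool) (sub : String → List String) (F : String → String → String) (p : Int) :
    ∀ (K : List String) (st : List String × List Int),
    K.foldl (fun st1 nt => if c nt then (sub nt).foldl (fun st2 x => (st2.1 ++ [F nt x], st2.2 ++ [p])) st1 else st1) st
      = (st.1 ++ K.flatMap (fun nt => if c nt then (sub nt).map (F nt) else []),
         st.2 ++ List.replicate (K.flatMap (fun nt => if c nt then (sub nt).map (F nt) else [])).length p) := by
  intro K
  induction K with
  | nil => intro st; simp
  | cons nt K ih =>
    intro st
    simp only [List.foldl_cons, List.flatMap_cons]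
    by_cases h : c nt
    · rw [if_pos h, if_pos h, pv_fold_append_pair _ _ (F nt) p, ih]
      rw [List.length_append, List.length_map, List.replicate_add]
      simp [List.append_assoc]
    · rw [if_neg h, if_neg h, ih]
      simp

-- A's modifs/pos collection loop
theorem pv_match_fold (a : String) (l : List (Int × Char)) :
    ∀ (mo : List String × List Int),
    l.foldl (fun mo2 nc => if String.ofList [nc.2] = a then (mo2.1 ++ [a], mo2.2 ++ [nc.1]) else mo2) mo
      = (mo.1 ++ ((l.filter (fun nc => decide (String.ofList [nc.2] = a))).map (fun _ => a)),
         mo.2 ++ ((l.filter (fun nc => decide (String.ofList [nc.2] = a))).map (·.1))) := by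
  induction l with
  | nil => intro mo; simp
  | cons nc l ih =>
    intro mo
    by_cases h : String.ofList [nc.2] = a
    · simp [h, ih, List.append_assoc]
    · simp [h, ih]

def pvPosFor (seq : List Char) (c : String → Bool) (k : String) : List (Int × Char) :=
  if c k then (PySem.List.enumerate seq).filter (fun nc => decide (String.ofList [nc.2] = k)) else []

theorem pv_mopos_fold (c : String → Bool) (seq : List Char) :
    ∀ (K : List String) (mo : List String × List Int),
    K.foldl (fun mo a =>
        if c a then
          (PySem.List.enumerate seq).foldl
            (fun mo2 nc => if String.ofList [nc.2] = a then (mo2.1 ++ [a], mo2.2 ++ [nc.1]) else mo2) mo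
        else mo) mo
      = (mo.1 ++ K.flatMap (fun k => (pvPosFor seq c k).map (fun _ => k)),
         mo.2 ++ K.flatMap (fun k => (pvPosFor seq c k).map (·.1))) := by
  intro K
  induction K with
  | nil => intro mo; simp
  | cons a K ih =>
    intro mo
    simp only [List.foldl_cons, List.flatMap_cons, pvPosFor]
    by_cases h : c a
    · rw [if_pos h, pv_match_fold a _ mo, ih, if_pos h]
      simp [List.append_assoc, pvPosFor]
    · rw [if_neg h, ih, if_neg h]
      simp [pvPosFor]

theorem pv_len_pyProduct {α : Type} : ∀ (fs : List (List α)) (x : List α), x ∈ pyProduct fs → x.length = fs.length := by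
  intro fs
  induction fs with
  | nil => intro x hx; simp [pyProduct] at hx; simp [hx]
  | cons f fs ih =>
    intro x hx
    simp only [pyProduct, List.mem_flatMap, List.mem_map] at hx
    obtain ⟨t, _, tl, htl, rfl⟩ := hx
    simp [ih tl htl]

-- Python's string[pos[n]] = t loop over enumerate(x) is the zip-based substitution
theorem pv_enum_subst :
    ∀ (x : List Char) (pre pos : List Int) (chars : List Char), x.length ≤ pos.length →
    (PySem.List.enumerate x (pre.length : Int)).foldl
        (fun s nt => s.set (PySem.List.pyGetD (pre ++ pos) nt.1 0).toNat nt.2) chars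
      = (pos.zip x).foldl (fun s pt => s.set pt.1.toNat pt.2) chars := by
  intro x
  induction x with
  | nil => intro pre pos chars _; simp [PySem.List.enumerate]
  | cons t x ih =>
    intro pre pos chars hlen
    match pos with
    | [] => simp at hlen
    | p :: pos' =>
      rw [PySem.List.enumerate_cons]
      simp only [List.foldl_cons, List.zip_cons_cons]
      have h1 : PySem.List.pyGetD (pre ++ p :: pos') (pre.length : Int) 0 = p := by
        rw [PySem.List.pyGetD_natCast]
        rw [List.getD_eq_getElem?_getD, List.getElem?_append_right (Nat.le_refl _)]
        simp
      rw [h1]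
      have h2 : ((pre.length : Int) + 1) = ((pre ++ [p]).length : Int) := by
        simp
      have h3 : pre ++ p :: pos' = (pre ++ [p]) ++ pos' := by simp
      rw [h2, h3]
      exact ih (pre ++ [p]) pos' _ (by simpa using hlen)

-- A's string2 loop is a map
theorem pv_string2 (al : PySem.Dict String String) :
    ∀ (string : List Char) (done : List String),
    (PySem.List.enumerate string (done.length : Int)).foldl
        (fun s2 ys => if al.contains (String.ofList [ys.2]) then s2.set ys.1.toNat (al.getD (String.ofList [ys.2]) "") else s2)
        (done ++ string.map (fun c => String.ofList [c]))
      = done ++ string.map (fun c => al.getD (String.ofList [c]) (String.ofList [c])) := by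
  intro string
  induction string with
  | nil => intro done; simp [PySem.List.enumerate]
  | cons ch cs ih =>
    intro done
    rw [PySem.List.enumerate_cons]
    simp only [List.map_cons, List.foldl_cons]
    have h2 : ((done.length : Int) + 1) = (((done ++ [al.getD (String.ofList [ch]) (String.ofList [ch])]).length : Int)) := by simp
    by_cases h : al.contains (String.ofList [ch])
    · simp only [h, if_true, Int.toNat_natCast]
      rw [pv_set_len_append]
      rw [pv_getD_default al _ h "" (String.ofList [ch])]
      have h3 : done ++ al.getD (String.ofList [ch]) (String.ofList [ch]) :: List.map (fun c => String.ofList [c]) cs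
          = (done ++ [al.getD (String.ofList [ch]) (String.ofList [ch])]) ++ List.map (fun c => String.ofList [c]) cs := by simp
      rw [h3, h2, ih]
      simp
    · rw [if_neg (by simp [h])]
      have h4 : al.getD (String.ofList [ch]) (String.ofList [ch]) = String.ofList [ch] := by
        exact PySem.Dict.getD_of_not_contains _ _ (by simpa using h)
      have h3 : done ++ String.ofList [ch] :: List.map (fun c => String.ofList [c]) cs
          = (done ++ [String.ofList [ch]]) ++ List.map (fun c => String.ofList [c]) cs := by simp
      rw [h3]
      have h2' : ((done.length : Int) + 1) = (((done ++ [String.ofList [ch]]).length : Int)) := by simp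
      rw [h2', ih]
      simp [h4]

-- B's recursive expansion is the mapped cartesian product
theorem pv_prod_expand (al : PySem.Dict String String) (t0 mid tail : String) :
    ∀ (slots : List (Int × List Char)) (chars : List Char),
    pvExpand al t0 mid tail slots chars
      = (pyProduct (slots.map (·.2))).map (fun x =>
          let sub := ((slots.map (·.1)).zip x).foldl (fun s pt => s.set pt.1.toNat pt.2) chars
          t0 ++ " " ++ String.ofList sub ++ " " ++ mid ++ " " ++
          PySem.Str.join "" (sub.map (fun c => al.getD (String.ofList [c]) (String.ofList [c]))) ++ tail) := by
  intro slots
  induction slots with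
  | nil => intro chars; simp [pvExpand, pyProduct]
  | cons slot rest ih =>
    intro chars
    obtain ⟨n, alts⟩ := slot
    show alts.foldl (fun out t => out ++ pvExpand al t0 mid tail rest (chars.set n.toNat t)) [] = _
    rw [PySem.List.foldl_append_eq_flatMap]
    simp only [List.nil_append, List.map_cons, pyProduct, List.map_flatMap, List.map_map]
    refine List.flatMap_congr ?_
    intro t _
    rw [ih (chars.set n.toNat t)]
    apply List.map_congr_left
    intro tl _
    simp [List.zip_cons_cons]

-- association-list dict: flatMap over items = flatMap over keys when only the key's value is used
theorem pv_items_flatMap {ν β : Type} (d : PySem.Dict String ν) (h : String × ν → List β) (g : String → List β)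
    (hgh : ∀ p ∈ d.items, h p = g p.1) :
    d.items.flatMap h = d.keys.flatMap g := by
  have hk : d.keys = d.items.map (·.1) := rfl
  rw [hk, List.flatMap_map]
  exact List.flatMap_congr hgh

theorem pv_enum_subst0 (x : List Char) (pos : List Int) (chars : List Char) (h : x.length ≤ pos.length) :
    (PySem.List.enumerate x).foldl (fun s nt => s.set (PySem.List.pyGetD pos nt.1 0).toNat nt.2) chars
      = (pos.zip x).foldl (fun s pt => s.set pt.1.toNat pt.2) chars := by
  simpa using pv_enum_subst x [] pos chars h

theorem pv_string20 (al : PySem.Dict String String) (string : List Char) :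
    (PySem.List.enumerate string).foldl
        (fun s2 ys => if al.contains (String.ofList [ys.2]) then s2.set ys.1.toNat (al.getD (String.ofList [ys.2]) "") else s2)
        (string.map (fun c => String.ofList [c]))
      = string.map (fun c => al.getD (String.ofList [c]) (String.ofList [c])) := by
  simpa using pv_string2 al string []

-- A's whole multiple-'@' branch against B's slots/expand form
theorem pv_multi_branch (mp : PySem.Dict String (List String)) (al : PySem.Dict String String)
    (hnd : mp.keys.Nodup) (seqS t0 mid tailstr : String) (p : Int) (st : List String × List Int) :
    (let mopos := mp.keys.foldl (fun (mo : List String × List Int) a =>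
        if PySem.Str.isIn a seqS then
          (PySem.List.enumerate seqS.toList).foldl
            (fun mo2 nc => if String.ofList [nc.2] = a then (mo2.1 ++ [a], mo2.2 ++ [nc.1]) else mo2) mo
        else mo) ([], [])
     let pos := mopos.2
     let new_modifs := mopos.1.foldl (fun acc m => acc ++ [(m ++ PySem.Str.join "" (mp.getD m [])).toList]) []
     (pyProduct new_modifs).foldl (fun (st1 : List String × List Int) x =>
        let string := (PySem.List.enumerate x).foldl
          (fun s nt => s.set (PySem.List.pyGetD pos nt.1 0).toNat nt.2) seqS.toList
        let string1 := String.ofList string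
        let string2 := (PySem.List.enumerate string).foldl (fun (s2 : List String) ys =>
            if al.contains (String.ofList [ys.2]) then s2.set ys.1.toNat (al.getD (String.ofList [ys.2]) "") else s2)
          (string.map (fun c => String.ofList [c]))
        (st1.1 ++ [t0 ++ " " ++ string1 ++ " " ++ mid ++ " " ++ PySem.Str.join "" string2 ++ tailstr],
         st1.2 ++ [p])) st)
    = (st.1 ++ pvExpand al t0 mid tailstr
          (mp.items.flatMap (fun q =>
            if PySem.Str.isIn q.1 seqS then
              (PySem.List.enumerate seqS.toList).filterMap (fun nc =>
                if String.ofList [nc.2] = q.1 then some (nc.1, (q.1 ++ PySem.Str.join "" q.2).toList) else none)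
            else [])) seqS.toList,
       st.2 ++ List.replicate (pvExpand al t0 mid tailstr
          (mp.items.flatMap (fun q =>
            if PySem.Str.isIn q.1 seqS then
              (PySem.List.enumerate seqS.toList).filterMap (fun nc =>
                if String.ofList [nc.2] = q.1 then some (nc.1, (q.1 ++ PySem.Str.join "" q.2).toList) else none)
            else [])) seqS.toList).length p) := by
  dsimp only []
  rw [pv_mopos_fold (fun a => PySem.Str.isIn a seqS) seqS.toList mp.keys ([], [])]
  dsimp only []
  simp only [List.nil_append]
  rw [PySem.List.foldl_append_singleton_eq_map]
  simp only [List.nil_append]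
  rw [pv_fold_append_pair]
  -- name the pieces
  have hslots : (mp.items.flatMap (fun q =>
      if PySem.Str.isIn q.1 seqS then
        (PySem.List.enumerate seqS.toList).filterMap (fun nc =>
          if String.ofList [nc.2] = q.1 then some (nc.1, (q.1 ++ PySem.Str.join "" q.2).toList) else none)
      else []))
      = mp.keys.flatMap (fun k => (pvPosFor seqS.toList (fun a => PySem.Str.isIn a seqS) k).map
          (fun nc => (nc.1, (k ++ PySem.Str.join "" (mp.getD k [])).toList))) := by
    rw [pv_items_flatMap mp _ (fun k =>
        if PySem.Str.isIn k seqS then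
          (PySem.List.enumerate seqS.toList).filterMap (fun nc =>
            if String.ofList [nc.2] = k then some (nc.1, (k ++ PySem.Str.join "" (mp.getD k [])).toList) else none)
        else [])
        (by
          intro q hq
          dsimp only []
          rw [PySem.Dict.getD_of_mem_items mp hq hnd []])]
    refine List.flatMap_congr ?_
    intro k _
    by_cases hc : PySem.Str.isIn k seqS
    · rw [if_pos hc, pv_filterMap_eq]
      simp only [pvPosFor]
      rw [if_pos hc]
    · rw [if_neg hc]
      simp only [pvPosFor]
      rw [if_neg hc]
      simp
  have hXY : (pyProduct (List.map (fun m => (m ++ PySem.Str.join "" (mp.getD m [])).toList)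
        (mp.keys.flatMap (fun k => (pvPosFor seqS.toList (fun a => PySem.Str.isIn a seqS) k).map (fun _ => k))))).map
        (fun x =>
          t0 ++ " " ++ String.ofList ((PySem.List.enumerate x).foldl
              (fun s nt => s.set (PySem.List.pyGetD
                  (mp.keys.flatMap (fun k => (pvPosFor seqS.toList (fun a => PySem.Str.isIn a seqS) k).map (fun (nc : Int × Char) => nc.1)))
                  nt.1 0).toNat nt.2) seqS.toList) ++ " " ++ mid ++ " " ++
          PySem.Str.join "" ((PySem.List.enumerate ((PySem.List.enumerate x).foldl
              (fun s nt => s.set (PySem.List.pyGetD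
                  (mp.keys.flatMap (fun k => (pvPosFor seqS.toList (fun a => PySem.Str.isIn a seqS) k).map (fun (nc : Int × Char) => nc.1)))
                  nt.1 0).toNat nt.2) seqS.toList)).foldl (fun (s2 : List String) ys =>
                if al.contains (String.ofList [ys.2]) then s2.set ys.1.toNat (al.getD (String.ofList [ys.2]) "") else s2)
              (((PySem.List.enumerate x).foldl
              (fun s nt => s.set (PySem.List.pyGetD
                  (mp.keys.flatMap (fun k => (pvPosFor seqS.toList (fun a => PySem.Str.isIn a seqS) k).map (fun (nc : Int × Char) => nc.1)))
                  nt.1 0).toNat nt.2) seqS.toList).map (fun c => String.ofList [c]))) ++ tailstr)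
      = pvExpand al t0 mid tailstr
          (mp.keys.flatMap (fun k => (pvPosFor seqS.toList (fun a => PySem.Str.isIn a seqS) k).map
            (fun nc => (nc.1, (k ++ PySem.Str.join "" (mp.getD k [])).toList)))) seqS.toList := by
    rw [pv_prod_expand]
    have h2 : (mp.keys.flatMap (fun k => (pvPosFor seqS.toList (fun a => PySem.Str.isIn a seqS) k).map
          (fun nc => (nc.1, (k ++ PySem.Str.join "" (mp.getD k [])).toList)))).map (fun p => p.2)
        = List.map (fun m => (m ++ PySem.Str.join "" (mp.getD m [])).toList)
            (mp.keys.flatMap (fun k => (pvPosFor seqS.toList (fun a => PySem.Str.isIn a seqS) k).map (fun _ => k))) := by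
      simp only [List.map_flatMap, List.map_map]
      exact List.flatMap_congr (fun k _ => List.map_congr_left (fun nc _ => rfl))
    have h1 : (mp.keys.flatMap (fun k => (pvPosFor seqS.toList (fun a => PySem.Str.isIn a seqS) k).map
          (fun nc => (nc.1, (k ++ PySem.Str.join "" (mp.getD k [])).toList)))).map (fun p => p.1)
        = mp.keys.flatMap (fun k => (pvPosFor seqS.toList (fun a => PySem.Str.isIn a seqS) k).map (fun (nc : Int × Char) => nc.1)) := by
      simp only [List.map_flatMap, List.map_map]
      exact List.flatMap_congr (fun k _ => List.map_congr_left (fun nc _ => rfl))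
    rw [h2, h1]
    apply List.map_congr_left
    intro x hx
    have hlx := pv_len_pyProduct _ x hx
    have hlen : x.length ≤ (mp.keys.flatMap (fun k => (pvPosFor seqS.toList (fun a => PySem.Str.isIn a seqS) k).map (fun (nc : Int × Char) => nc.1))).length := by
      rw [hlx, ← h1, ← h2]
      simp
    rw [pv_enum_subst0 x _ seqS.toList hlen]
    rw [pv_string20 al]
  rw [hslots, ← hXY, List.length_map]

-- whole enumerate fold-- whole enumerate fold over lines, with a canonical per-line step
theorem pv_state_fold (g : String → List String) :
    ∀ (L : List String) (s : Int) (st : List String × List Int),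
    (PySem.List.enumerate L s).foldl
        (fun st il => (st.1 ++ g il.2, st.2 ++ List.replicate (g il.2).length (il.1 + 1))) st
      = (st.1 ++ L.flatMap g, st.2 ++ pvPsFrom g L s) := by
  intro L
  induction L with
  | nil => intro s st; simp [PySem.List.enumerate, pvPsFrom]
  | cons l L ih =>
    intro s st
    rw [PySem.List.enumerate_cons]
    simp only [List.foldl_cons, ih, pvPsFrom, List.flatMap_cons]
    simp [List.append_assoc]

theorem pv_zip_pairs (g : String → List String) :
    ∀ (L : List String) (s : Int),
    (L.flatMap g).zip (pvPsFrom g L s) = pvPairsFrom g L s := by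
  intro L
  induction L with
  | nil => intro s; simp [pvPsFrom, pvPairsFrom]
  | cons l L ih =>
    intro s
    simp only [List.flatMap_cons, pvPsFrom, pvPairsFrom]
    rw [List.zip_append (by simp), ih, pv_zip_replicate]

theorem pv_insert_fold_inner (s : Int) :
    ∀ (M : List String) (Q t : List String) (acc : Int), (Q.length : Int) = s + 1 + acc →
    (M.map (fun m => (m, s + 1))).foldl
        (fun (la : List String × Int) mpp => (la.1.insertIdx (mpp.2 + la.2).toNat mpp.1, la.2 + 1)) (Q ++ t, acc)
      = (Q ++ M ++ t, acc + M.length) := by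
  intro M
  induction M with
  | nil => intro Q t acc h; simp
  | cons m M ih =>
    intro Q t acc h
    simp only [List.map_cons, List.foldl_cons]
    have h1 : (s + 1 + acc).toNat = Q.length := by omega
    rw [h1, pv_insertIdx_append]
    have h2 : Q ++ m :: t = (Q ++ [m]) ++ t := by simp
    rw [h2, ih (Q ++ [m]) t (acc + 1) (by simp; omega)]
    simp [List.append_assoc]
    omega

theorem pv_insert_fold (g : String → List String) :
    ∀ (L P : List String) (acc s : Int), (P.length : Int) = s + acc →
    ((pvPairsFrom g L s).foldl
        (fun (la : List String × Int) mpp => (la.1.insertIdx (mpp.2 + la.2).toNat mpp.1, la.2 + 1)) (P ++ L, acc)).1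
      = P ++ L.flatMap (fun l => l :: g l) := by
  intro L
  induction L with
  | nil => intro P acc s h; simp [pvPairsFrom]
  | cons l L ih =>
    intro P acc s h
    simp only [pvPairsFrom, List.foldl_append]
    have h2 : P ++ l :: L = (P ++ [l]) ++ L := by simp
    rw [h2, pv_insert_fold_inner s _ (P ++ [l]) L acc (by simp; omega)]
    have h3 : (P ++ [l]) ++ g l ++ L = (P ++ l :: g l) ++ L := by simp
    rw [h3, ih (P ++ l :: g l) (acc + (g l).length) (s + 1) (by simp; omega)]
    simp [List.flatMap_cons, List.append_assoc]

-- B's main loop is a flatMap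
theorem pv_alt_eq (input_lines : List String) (mod_partial : List (String × List String)) (mod_alphabet : List (String × String)) :
    mod_nts_exceptions_alt input_lines mod_partial mod_alphabet
      = input_lines.flatMap (fun l => l :: pvV (PySem.Dict.ofList mod_partial) (PySem.Dict.ofList mod_alphabet) l) := by
  simp only [mod_nts_exceptions_alt]
  rw [PySem.List.foldl_congr_mem _ _
      (fun res line => res ++ (line :: pvV (PySem.Dict.ofList mod_partial) (PySem.Dict.ofList mod_alphabet) line)) _
      (by
        intro acc x _
        simp only [pvV]
        by_cases h : 1 ≤ PySem.Str.count x "@"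
        · rw [if_pos h, if_pos h]; simp
        · rw [if_neg h, if_neg h])]
  rw [PySem.List.foldl_append_eq_flatMap]
  simp

-- A's per-line loop step against B's per-line generation
theorem pv_step_eq (mp : PySem.Dict String (List String)) (al : PySem.Dict String String)
    (hnd : mp.keys.Nodup) (i : Int) (line : String) (st : List String × List Int) :
    (let toks := PySem.Str.split₀ line
     if PySem.Str.count line "@" = 1 then
       mp.keys.foldl (fun st1 nt =>
         if PySem.Str.isIn nt (PySem.List.pyGetD toks 1 "") then
           (mp.getD nt []).foldl (fun st2 x =>
             let s := PySem.Str.replace (PySem.List.pyGetD toks 1 "") nt x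
             let t := PySem.Str.replace (PySem.List.pyGetD toks (-1) "") (al.getD nt "") (al.getD x "")
             (st2.1 ++ [PySem.List.pyGetD toks 0 "" ++ " " ++ s ++ " " ++
                        PySem.Str.join " " (PySem.List.slice toks (some 2) (some 7)) ++ " " ++ t],
              st2.2 ++ [i + 1])) st1
         else st1) st
     else if 1 < PySem.Str.count line "@" then
       let mopos := mp.keys.foldl (fun (mo : List String × List Int) a =>
         if PySem.Str.isIn a (PySem.List.pyGetD toks 1 "") then
           (PySem.List.enumerate (PySem.List.pyGetD toks 1 "").toList).foldl (fun mo2 nc =>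
             if String.ofList [nc.2] = a then (mo2.1 ++ [a], mo2.2 ++ [nc.1]) else mo2) mo
         else mo) ([], [])
       let pos := mopos.2
       let new_modifs := mopos.1.foldl (fun acc m =>
         acc ++ [(m ++ PySem.Str.join "" (mp.getD m [])).toList]) []
       (pyProduct new_modifs).foldl (fun (st1 : List String × List Int) x =>
         let string := (PySem.List.enumerate x).foldl
           (fun s nt => s.set (PySem.List.pyGetD pos nt.1 0).toNat nt.2) (PySem.List.pyGetD toks 1 "").toList
         let string1 := String.ofList string
         let string2 := (PySem.List.enumerate string).foldl (fun (s2 : List String) ys =>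
             if al.contains (String.ofList [ys.2]) then s2.set ys.1.toNat (al.getD (String.ofList [ys.2]) "") else s2)
           (string.map (fun c => String.ofList [c]))
         (st1.1 ++ [PySem.List.pyGetD toks 0 "" ++ " " ++ string1 ++ " " ++
                    PySem.Str.join " " (PySem.List.slice toks (some 2) (some 7)) ++ " " ++
                    PySem.Str.join "" string2 ++
                    String.ofList (List.replicate (PySem.Str.count (PySem.List.pyGetD toks (-1) "") "@") '@')],
          st1.2 ++ [i + 1])) st
     else st)
    = (st.1 ++ pvV mp al line, st.2 ++ List.replicate (pvV mp al line).length (i + 1)) := by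
  by_cases h1 : PySem.Str.count line "@" = 1
  · have hle : 1 ≤ PySem.Str.count line "@" := by omega
    have hv : pvV mp al line = mp.keys.flatMap (fun nt =>
        if PySem.Str.isIn nt (PySem.List.pyGetD (PySem.Str.split₀ line) 1 "") then
          (mp.getD nt []).map (fun x =>
            PySem.List.pyGetD (PySem.Str.split₀ line) 0 "" ++ " " ++
            PySem.Str.replace (PySem.List.pyGetD (PySem.Str.split₀ line) 1 "") nt x ++ " " ++
            PySem.Str.join " " (PySem.List.slice (PySem.Str.split₀ line) (some 2) (some 7)) ++ " " ++
            PySem.Str.replace (PySem.List.pyGetD (PySem.Str.split₀ line) (-1) "")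
              (al.getD nt "") (al.getD x ""))
        else []) := by
      simp only [pvV, pvVariants, if_pos hle, if_pos h1]
    dsimp only []
    rw [if_pos h1, hv]
    exact pv_single_fold _ _ _ (i + 1) mp.keys st
  · by_cases h2 : 1 < PySem.Str.count line "@"
    · have hle : 1 ≤ PySem.Str.count line "@" := by omega
      have hv : pvV mp al line = pvExpand al (PySem.List.pyGetD (PySem.Str.split₀ line) 0 "")
          (PySem.Str.join " " (PySem.List.slice (PySem.Str.split₀ line) (some 2) (some 7)))
          (String.ofList (List.replicate (PySem.Str.count (PySem.List.pyGetD (PySem.Str.split₀ line) (-1) "") "@") '@'))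
          ((PySem.Dict.items mp).flatMap (fun q =>
            if PySem.Str.isIn q.1 (PySem.List.pyGetD (PySem.Str.split₀ line) 1 "") then
              (PySem.List.enumerate (PySem.List.pyGetD (PySem.Str.split₀ line) 1 "").toList).filterMap (fun nc =>
                if String.ofList [nc.2] = q.1 then some (nc.1, (q.1 ++ PySem.Str.join "" q.2).toList) else none)
            else []))
          (PySem.List.pyGetD (PySem.Str.split₀ line) 1 "").toList := by
        simp only [pvV, pvVariants, if_pos hle, if_neg h1]
      dsimp only []
      rw [if_neg h1, if_pos h2, hv]
      exact pv_multi_branch mp al hnd (PySem.List.pyGetD (PySem.Str.split₀ line) 1 "") _ _ _ (i + 1) st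
    · have h0 : ¬ (1 ≤ PySem.Str.count line "@") := by omega
      dsimp only []
      rw [if_neg h1, if_neg h2]
      simp only [pvV]
      rw [if_neg h0]
      simp

-- ===== VERDICT (by name: the statement is the Claim_ definition above) =====
theorem mod_nts_exceptions_spec : Claim_equal_mod_nts_exceptions := by
  unfold Claim_equal_mod_nts_exceptions
  intro input_lines mod_partial mod_alphabet _ _
  unfold Spec_mod_nts_exceptions
  rw [pv_alt_eq]
  simp only [mod_nts_exceptions]
  rw [PySem.List.foldl_congr_mem (PySem.List.enumerate input_lines) _
      (fun (st : List String × List Int) il =>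
        (st.1 ++ pvV (PySem.Dict.ofList mod_partial) (PySem.Dict.ofList mod_alphabet) il.2,
         st.2 ++ List.replicate (pvV (PySem.Dict.ofList mod_partial) (PySem.Dict.ofList mod_alphabet) il.2).length (il.1 + 1)))
      ([], [])
      (fun acc x _ => pv_step_eq (PySem.Dict.ofList mod_partial) (PySem.Dict.ofList mod_alphabet)
        (PySem.Dict.nodup_keys_ofList mod_partial) x.1 x.2 acc)]
  rw [pv_state_fold (pvV (PySem.Dict.ofList mod_partial) (PySem.Dict.ofList mod_alphabet)) input_lines 0 ([], [])]
  simp only [List.nil_append]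
  rw [pv_zip_pairs]
  have h := pv_insert_fold (pvV (PySem.Dict.ofList mod_partial) (PySem.Dict.ofList mod_alphabet))
    input_lines [] 0 0 (by simp)
  simpa using h
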